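-- pv_equiv track=rewrite | github.com/Dev-Ian-Lee/algorithm | programmers/level2/binary_conversion.py | solution
-- ===== SOURCE A (Python) =====
-- def solution(s):
--     num_of_zero = 0
--     cnt = 0
--
--     while True:
--         if s == "1":
--             break
--
--         cnt += 1
--         num_of_zero += s.count("0")
--
--         s = s.replace("0", "")
--         size = len(s)
--         s = bin(size)[2:]
--
--     answer = [cnt, num_of_zero]
--     return answer
-- ===== SOURCE B (Python) =====
-- def _trajectory(m):
--     # list of the ones-counts the reduction passes through, from m down to (excluding) 1
--     return [] if m == 1 else [m] + _trajectory(m.bit_count())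
--
--
-- def solution(s):
--     if s == "1":
--         return [0, 0]
--     zeros0 = s.count("0")
--     traj = _trajectory(len(s) - zeros0)
--     return [1 + len(traj),
--             zeros0 + sum(m.bit_length() - m.bit_count() for m in traj)]
-- ===== Notes on version B (the rewrite author's own statement) =====
-- stated objective: alternative
-- what changed: B materialises the list of ones-counts the reduction passes through via a recursive trajectory builder on integers, then computes the round count as the list's length and the removed zeros as an aggregated sum (bit_length - bit_count per element), instead of A's single while loop that rebuilds a binary string with replace/bin and mutates two accumulators each round.
import Mathlib
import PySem

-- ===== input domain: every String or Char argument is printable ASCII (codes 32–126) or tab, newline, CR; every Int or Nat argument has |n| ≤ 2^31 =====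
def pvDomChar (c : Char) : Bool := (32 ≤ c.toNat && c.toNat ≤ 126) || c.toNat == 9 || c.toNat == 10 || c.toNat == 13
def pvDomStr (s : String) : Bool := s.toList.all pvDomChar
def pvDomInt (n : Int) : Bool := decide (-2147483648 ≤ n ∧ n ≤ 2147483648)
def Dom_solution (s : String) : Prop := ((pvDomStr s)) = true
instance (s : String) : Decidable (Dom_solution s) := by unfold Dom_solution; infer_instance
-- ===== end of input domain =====

-- B replaces A's while loop (rebuild a binary string with replace/bin, mutate two accumulators)
-- by a recursive builder of the list of ones-counts the reduction passes through, aggregated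
-- afterwards by length and sum; equal results proved on Pre_ (some non-'0' char).

-- ===== PORT A =====
-- The while-True loop, one fuel unit per iteration; fuel is only a totality guard: the proof
-- shows s.length + 1 units are never exhausted on Pre_ inputs.  The loop state string is kept
-- as List Char (PySem.Chars.* are the definitional core of PySem.Str.*).
def solutionLoop (fuel : Nat) (s : List Char) (cnt numZero : Int) : List Int :=
  match fuel with
  | 0 => [cnt, numZero]
  | fuel + 1 =>
    if s = ['1'] then [cnt, numZero]
    else
      let cnt' := cnt + 1
      let numZero' := numZero + (PySem.Chars.count s ['0'] : Int)
      let s' := PySem.Chars.replace s ['0'] []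
      let size : Int := PySem.Chars.len s'
      -- bin(size)[2:] : PySem.Int.toBinChars0b is bin(.), then the [2:] slice
      let s'' := PySem.List.slice (PySem.Int.toBinChars0b size) (some 2) none
      solutionLoop fuel s'' cnt' numZero'

def solution (s : String) : List Int :=
  solutionLoop (s.toList.length + 1) s.toList 0 0

-- ===== PORT B =====
-- _trajectory of Source B; fuel m.toNat suffices (m strictly decreases), a totality guard only
def trajF (fuel : Nat) (m : Int) : List Int :=
  match fuel with
  | 0 => []
  | fuel + 1 =>
    if m = 1 then [] else m :: trajF fuel (PySem.Int.bitCount m : Int)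

def solution_alt (s : String) : List Int :=
  if s = "1" then [0, 0]
  else
    let zeros0 : Int := PySem.Str.count s "0"
    let traj := trajF (PySem.Str.len s - zeros0).toNat (PySem.Str.len s - zeros0)
    [1 + (traj.length : Int),
     zeros0 + (traj.map (fun m => (PySem.Int.bitLength m : Int) - (PySem.Int.bitCount m : Int))).sum]

-- ===== PRECONDITION & SPEC =====
-- Pre_ excludes exactly the inputs on which A never returns: the empty string and all-'0'
-- strings make A's while-True loop cycle on s = "0" forever.
def Pre_solution (s : String) : Prop := s.toList.any (· ≠ '0') = true
instance (s : String) : Decidable (Pre_solution s) := by unfold Pre_solution; infer_instance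
def pvWitness_solution : String := "110010"

def Spec_solution (s : String) (out : List Int) : Prop := out = solution_alt s
instance (s : String) (out : List Int) : Decidable (Spec_solution s out) := by unfold Spec_solution; infer_instance

-- ===== CLAIM (what is proved, stated in full; the proofs are below) =====
def Claim_equal_solution : Prop := ∀ (s : String), Dom_solution s → Pre_solution s → Spec_solution s (solution s)

-- ===== LEMMAS AND PROOFS =====

-- binary digit string of n (msb first), the proof-side characterisation of bin(n)[2:]
def binChars (n : Nat) : List Char :=
  if _h : n < 2 then [Nat.digitChar n]
  else binChars (n / 2) ++ [Nat.digitChar (n % 2)]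
decreasing_by exact Nat.div_lt_self (by omega) (by omega)

theorem toDigitsCore_eq_binChars : ∀ (f n : Nat) (acc : List Char), n < f →
    Nat.toDigitsCore 2 f n acc = binChars n ++ acc := by
  intro f
  induction f with
  | zero => omega
  | succ f ih =>
    intro n acc h
    rw [Nat.toDigitsCore]
    by_cases h2 : n / 2 = 0
    · have : n < 2 := by omega
      simp only [h2]
      rw [binChars, dif_pos this]
      have : n % 2 = n := Nat.mod_eq_of_lt this
      simp [this]
    · have hn2 : 2 ≤ n := by omega
      simp only [if_neg h2]
      rw [ih (n / 2) _ (by omega)]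
      conv_rhs => rw [binChars]
      rw [dif_neg (by omega : ¬ n < 2)]
      simp

theorem binChars_mem : ∀ (n : Nat), ∀ c ∈ binChars n, c = '0' ∨ c = '1' := by
  intro n
  induction n using Nat.strong_induction_on with
  | _ n ih =>
    intro c hc
    by_cases h : n < 2
    · rw [binChars, dif_pos h] at hc
      interval_cases n <;> simp_all [Nat.digitChar]
    · rw [binChars, dif_neg h] at hc
      rcases List.mem_append.mp hc with h1 | h1
      · exact ih (n / 2) (Nat.div_lt_self (by omega) (by omega)) c h1
      · have : n % 2 < 2 := Nat.mod_lt _ (by omega)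
        interval_cases hm : (n % 2) <;> simp_all [Nat.digitChar]

theorem binChars_ne_nil (n : Nat) : binChars n ≠ [] := by
  rw [binChars]; split <;> simp

theorem binChars_eq_one_iff (n : Nat) : binChars n = ['1'] ↔ n = 1 := by
  constructor
  · intro h
    by_cases h2 : n < 2
    · rw [binChars, dif_pos h2] at h
      interval_cases n <;> simp_all [Nat.digitChar]
    · rw [binChars, dif_neg h2] at h
      have := binChars_ne_nil (n / 2)
      rcases List.exists_cons_of_ne_nil this with ⟨a, t, ht⟩
      rw [ht] at h
      simp at h
  · intro h; subst h; rw [binChars]; norm_num [Nat.digitChar]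

theorem slice_toBin (n : Nat) :
    PySem.List.slice (PySem.Int.toBinChars0b (n : Int)) (some 2) none = binChars n := by
  rw [PySem.Int.toBinChars0b, if_neg (by omega : ¬ (n : Int) < 0)]
  rw [PySem.List.slice_from _ (by omega : (0:Int) ≤ 2)]
  simp only [Int.toNat_natCast]
  show List.drop 2 ('0' :: 'b' :: Nat.toDigits 2 n) = binChars n
  rw [List.drop, List.drop, List.drop]
  rw [Nat.toDigits, toDigitsCore_eq_binChars _ _ _ (by omega)]
  simp

theorem binChars_count_one (n : Nat) : (binChars n).count '1' = PySem.Int.bitCount (n : Int) := by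
  induction n using Nat.strong_induction_on with
  | _ n ih =>
    by_cases h : n < 2
    · interval_cases n <;> rw [binChars] <;> decide
    · rw [binChars, dif_neg h, PySem.Int.bitCount_natCast (by omega : 0 < n)]
      rw [List.count_append, ih (n / 2) (Nat.div_lt_self (by omega) (by omega))]
      have h2 : n % 2 < 2 := Nat.mod_lt _ (by omega)
      interval_cases hm : (n % 2) <;> simp [Nat.digitChar] <;> omega

theorem binChars_length (n : Nat) (h : 0 < n) :
    (binChars n).length = PySem.Int.bitLength (n : Int) := by
  induction n using Nat.strong_induction_on with
  | _ n ih =>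
    by_cases h2 : n < 2
    · interval_cases n
      rw [binChars]; decide
    · rw [binChars, dif_neg h2, PySem.Int.bitLength_natCast (by omega : 0 < n)]
      rw [List.length_append]
      rw [ih (n / 2) (Nat.div_lt_self (by omega) (by omega)) (by omega)]
      simp

theorem count01 : ∀ (l : List Char), (∀ c ∈ l, c = '0' ∨ c = '1') →
    l.count '0' + l.count '1' = l.length := by
  intro l
  induction l with
  | nil => simp
  | cons a t ih =>
    intro h
    have ha := h a (by simp)
    have ht := ih (fun c hc => h c (by simp [hc]))
    rcases ha with h1 | h1 <;> subst h1 <;>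
      simp [List.count_cons] <;> omega

theorem filter01 : ∀ (l : List Char), (∀ c ∈ l, c = '0' ∨ c = '1') →
    (l.filter (fun c => !(c == '0'))).length = l.count '1' := by
  intro l
  induction l with
  | nil => simp
  | cons a t ih =>
    intro h
    have ha := h a (by simp)
    have ht := ih (fun c hc => h c (by simp [hc]))
    rcases ha with h1 | h1 <;> subst h1 <;> simp [List.count_cons, ht]

theorem count_go_single (c : Char) : ∀ (fuel : Nat) (cs : List Char) (acc : Nat),
    cs.length ≤ fuel → PySem.Chars.count.go [c] fuel cs acc = acc + cs.count c := by
  intro fuel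
  induction fuel with
  | zero =>
    intro cs acc h
    have : cs = [] := by simpa using h
    subst this
    simp [PySem.Chars.count.go]
  | succ f ih =>
    intro cs acc h
    match cs with
    | [] => simp [PySem.Chars.count.go]
    | a :: t =>
      rw [PySem.Chars.count.go]
      by_cases hac : c = a
      · subst hac
        rw [if_pos (by simp [List.isPrefixOf])]
        simp only [List.length_cons] at h
        rw [ih _ _ (by simp; omega)]
        simp [List.count_cons]
        omega
      · rw [if_neg (by simp [List.isPrefixOf]; exact fun hh => hac hh)]
        simp only [List.length_cons] at h
        rw [ih _ _ (by omega)]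
        simp [List.count_cons]
        intro hh
        exact absurd hh.symm hac

theorem count_single (cs : List Char) (c : Char) : PySem.Chars.count cs [c] = cs.count c := by
  rw [PySem.Chars.count]
  rw [if_neg (by simp)]
  rw [count_go_single c cs.length cs 0 (le_refl _)]
  omega

theorem replace_go_single (c : Char) : ∀ (fuel : Nat) (cs : List Char) (acc : List Char),
    cs.length ≤ fuel →
    PySem.Chars.replace.go [c] [] fuel cs acc = acc.reverse ++ cs.filter (fun x => !(x == c)) := by
  intro fuel
  induction fuel with
  | zero =>
    intro cs acc h
    have : cs = [] := by simpa using h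
    subst this
    simp [PySem.Chars.replace.go]
  | succ f ih =>
    intro cs acc h
    match cs with
    | [] => simp [PySem.Chars.replace.go]
    | a :: t =>
      rw [PySem.Chars.replace.go]
      simp only [List.length_cons] at h
      by_cases hac : c = a
      · subst hac
        rw [if_pos (by simp [List.isPrefixOf])]
        rw [ih _ _ (by simp; omega)]
        simp
      · rw [if_neg (by simp [List.isPrefixOf]; exact fun hh => hac hh)]
        rw [ih _ _ (by omega)]
        simp [List.filter_cons]
        intro hh
        exact absurd hh.symm hac

theorem replace_single (cs : List Char) (c : Char) :
    PySem.Chars.replace cs [c] [] = cs.filter (fun x => !(x == c)) := by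
  rw [PySem.Chars.replace]
  rw [if_neg (by simp)]
  rw [replace_go_single c cs.length cs [] (le_refl _)]
  simp

theorem bitCount_pos (n : Nat) (h : 0 < n) : 0 < PySem.Int.bitCount (n : Int) := by
  induction n using Nat.strong_induction_on with
  | _ n ih =>
    rw [PySem.Int.bitCount_natCast h]
    by_cases h2 : n < 2
    · interval_cases n; simp
    · have := ih (n / 2) (Nat.div_lt_self (by omega) (by omega)) (by omega)
      omega

theorem bitCount_lt_self (n : Nat) (h : 2 ≤ n) : PySem.Int.bitCount (n : Int) < n := by
  induction n using Nat.strong_induction_on with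
  | _ n ih =>
    rw [PySem.Int.bitCount_natCast (by omega)]
    by_cases h2 : n / 2 < 2
    · have h1 : 0 < PySem.Int.bitCount ((n / 2 : Nat) : Int) := bitCount_pos _ (by omega)
      have h3 : PySem.Int.bitCount ((n / 2 : Nat) : Int) ≤ PySem.Int.bitLength ((n / 2 : Nat) : Int) :=
        PySem.Int.bitCount_le_bitLength _
      have h4 : (n / 2 : Nat) = 1 := by omega
      have h5 : PySem.Int.bitCount ((1 : Nat) : Int) = 1 := by decide
      rw [h4, h5]
      omega
    · have := ih (n / 2) (Nat.div_lt_self (by omega) (by omega)) (by omega)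
      omega

-- A's loop from state binChars m computes cnt plus the trajectory length, and numZero plus
-- the trajectory's per-element (bitLength - bitCount) sum: the bridge between the two shapes.
theorem loop_eq : ∀ (m : Nat), 1 ≤ m → ∀ (fa fb : Nat) (cnt z : Int), m ≤ fa → m ≤ fb →
    solutionLoop fa (binChars m) cnt z =
      [cnt + ((trajF fb (m : Int)).length : Int),
       z + ((trajF fb (m : Int)).map
             (fun x => (PySem.Int.bitLength x : Int) - (PySem.Int.bitCount x : Int))).sum] := by
  intro m
  induction m using Nat.strong_induction_on with
  | _ m ih =>
    intro hm fa fb cnt z hfa hfb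
    match fa, fb with
    | 0, _ => omega
    | _ + 1, 0 => omega
    | fa + 1, fb + 1 =>
      by_cases h1 : m = 1
      · subst h1
        simp only [solutionLoop, trajF]
        rw [if_pos ((binChars_eq_one_iff 1).mpr rfl), if_pos (by norm_num)]
        simp
      · have hm2 : 2 ≤ m := by omega
        have hmem := binChars_mem m
        simp only [solutionLoop, trajF]
        rw [if_neg (fun hh => h1 ((binChars_eq_one_iff m).mp hh))]
        rw [if_neg (by exact_mod_cast show ¬ ((m:Int) = 1) from by exact_mod_cast h1)]
        rw [count_single, replace_single, PySem.Chars.len_eq]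
        rw [filter01 _ hmem, binChars_count_one]
        rw [slice_toBin]
        have hkm : PySem.Int.bitCount (m:Int) < m := bitCount_lt_self m hm2
        have hk1 : 1 ≤ PySem.Int.bitCount (m:Int) := bitCount_pos m (by omega)
        rw [ih _ hkm hk1 fa fb (cnt + 1) _ (by omega) (by omega)]
        simp only [List.length_cons, List.map_cons, List.sum_cons, List.cons.injEq, and_true]
        refine ⟨by push_cast; ring, ?_⟩
        · have h01 := count01 _ hmem
          have hc1 := binChars_count_one m
          have hlen := binChars_length m (by omega)
          have hle := PySem.Int.bitCount_le_bitLength (m : Int)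
          push_cast
          omega

theorem count_filter_len (l : List Char) :
    l.count '0' + (l.filter (fun x => !(x == '0'))).length = l.length := by
  have h := List.length_eq_length_filter_add (l := l) (fun x => x == '0')
  have h2 : l.count '0' = (l.filter (fun x => x == '0')).length := by
    simp [List.count_eq_countP, List.countP_eq_length_filter]
  simp at h
  omega

-- ===== VERDICT (by name: the statement is the Claim_ definition above) =====
theorem solution_spec : Claim_equal_solution := by
  intro s _hdom hpre
  show solution s = solution_alt s
  by_cases h1 : s = "1"
  · subst h1; decide
  · have hls : s.toList ≠ ['1'] := fun hh => h1 (String.toList_inj.mp hh)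
    have hex : ∃ c ∈ s.toList, ¬ c = '0' := by
      simpa [Pre_solution, List.any_eq_true] using hpre
    simp only [solution, solution_alt, if_neg h1, solutionLoop, if_neg hls]
    rw [count_single, replace_single, PySem.Chars.len_eq, slice_toBin]
    simp only [PySem.Str.count_eq, show ("0" : String).toList = ['0'] from rfl, count_single,
      zero_add]
    have hk_le : (s.toList.filter (fun x => !(x == '0'))).length ≤ s.toList.length :=
      List.length_filter_le _ _
    have hk_pos : 0 < (s.toList.filter (fun x => !(x == '0'))).length := by
      obtain ⟨c, hc, hc0⟩ := hex
      exact List.length_pos_of_mem (List.mem_filter.mpr ⟨hc, by simpa using hc0⟩)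
    have hcc : s.toList.count '0' + (s.toList.filter (fun x => !(x == '0'))).length
        = s.toList.length := count_filter_len s.toList
    have hm : PySem.Str.len s - ((s.toList.count '0' : Nat) : Int)
        = ((s.toList.filter (fun x => !(x == '0'))).length : Int) := by
      rw [PySem.Str.len_eq]
      omega
    rw [hm, Int.toNat_natCast]
    rw [loop_eq _ hk_pos _ _ _ _ (by omega) (le_refl _)]
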